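-- pv_equiv track=rewrite | github.com/ao-09blu/eth-program | progress/secondnode.py | make_neighbor
-- ===== SOURCE A (Python) =====
-- def make_neighbor(connection_target, registed_router_num):
--     neighbor_list = []#登録するルータは0それ以外は1を登録
--     for i in range(registed_router_num):
--         if(i in connection_target):
--             neighbor_list.append(1)
--         else:
--             neighbor_list.append(0)
--     return neighbor_list
-- ===== SOURCE B (Python) =====
-- def make_neighbor(connection_target, registed_router_num):
--     neighbor_list = [0] * registed_router_num
--     for t in connection_target:
--         if 0 <= t < registed_router_num:
--             neighbor_list[t] = 1
--     return neighbor_list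
-- ===== Notes on version B (the rewrite author's own statement) =====
-- stated objective: faster
-- what changed: Instead of scanning every index 0..n-1 and doing a linear membership test in connection_target, B allocates a zero list once and scatter-writes 1 at each in-range target.
import Mathlib
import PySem

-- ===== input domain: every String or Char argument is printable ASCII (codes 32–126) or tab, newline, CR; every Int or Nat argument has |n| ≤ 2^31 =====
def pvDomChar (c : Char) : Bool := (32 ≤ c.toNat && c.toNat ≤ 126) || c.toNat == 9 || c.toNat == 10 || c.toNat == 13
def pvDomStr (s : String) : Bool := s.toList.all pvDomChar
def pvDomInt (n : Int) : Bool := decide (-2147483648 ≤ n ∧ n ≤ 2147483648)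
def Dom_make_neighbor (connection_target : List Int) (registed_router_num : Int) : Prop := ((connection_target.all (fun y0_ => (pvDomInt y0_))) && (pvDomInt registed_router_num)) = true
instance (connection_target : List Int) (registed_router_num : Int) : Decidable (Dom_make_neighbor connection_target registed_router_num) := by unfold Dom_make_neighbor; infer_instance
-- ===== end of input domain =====

-- B replaces A's index scan with a linear membership test by a one-pass scatter write into a zero list (faster).

-- ===== PORT A =====
-- for i in range(n): append 1 if i in connection_target else 0
def make_neighbor (connection_target : List Int) (registed_router_num : Int) : List Int :=
  (PySem.List.pyRange 0 registed_router_num 1).foldl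
    (fun acc i => if i ∈ connection_target then acc ++ [1] else acc ++ [0]) []

-- ===== PORT B =====
-- neighbor_list = [0]*n; for t in targets: if 0 <= t < n: neighbor_list[t] = 1
def make_neighbor_alt (connection_target : List Int) (registed_router_num : Int) : List Int :=
  connection_target.foldl
    (fun acc t => if 0 ≤ t ∧ t < registed_router_num then acc.set t.toNat 1 else acc)
    (List.replicate registed_router_num.toNat 0)

-- ===== PRECONDITION & SPEC =====
def Spec_make_neighbor (connection_target : List Int) (registed_router_num : Int) (out : List Int) : Prop := out = make_neighbor_alt connection_target registed_router_num
instance (connection_target : List Int) (registed_router_num : Int) (out : List Int) : Decidable (Spec_make_neighbor connection_target registed_router_num out) := by unfold Spec_make_neighbor; infer_instance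

-- ===== CLAIM (what is proved, stated in full; the proofs are below) =====
def Claim_equal_make_neighbor : Prop := ∀ (connection_target : List Int) (registed_router_num : Int), Dom_make_neighbor connection_target registed_router_num → Spec_make_neighbor connection_target registed_router_num (make_neighbor connection_target registed_router_num)

-- ===== LEMMAS AND PROOFS =====

theorem scatter_length (ct : List Int) (n : Int) (acc : List Int) :
    (ct.foldl (fun acc t => if 0 ≤ t ∧ t < n then acc.set t.toNat 1 else acc) acc).length
      = acc.length := by
  induction ct generalizing acc with
  | nil => rfl
  | cons t ct ih =>
      simp only [List.foldl_cons]
      rw [ih]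
      split_ifs <;> simp

theorem scatter_get (ct : List Int) (n : Int) (acc : List Int) (i : Nat) (hi : i < acc.length)
    (hin : (i : Int) < n) :
    (ct.foldl (fun acc t => if 0 ≤ t ∧ t < n then acc.set t.toNat 1 else acc) acc).getD i 0
      = if (i : Int) ∈ ct then 1 else acc.getD i 0 := by
  induction ct generalizing acc with
  | nil => simp
  | cons t ct ih =>
      simp only [List.foldl_cons]
      by_cases h : 0 ≤ t ∧ t < n
      · rw [if_pos h]
        rw [ih (acc.set t.toNat 1) (by simpa using hi)]
        have hset : (acc.set t.toNat 1).getD i 0 = if t.toNat = i then 1 else acc.getD i 0 := by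
          rw [List.getD_eq_getElem _ _ (by simpa using hi), List.getElem_set,
              List.getD_eq_getElem _ _ hi]
        by_cases hm : (i : Int) ∈ ct
        · simp [hm]
        · rw [hset]
          by_cases he : t = (i : Int)
          · have : t.toNat = i := by omega
            simp [hm, he, this]
          · have hne : (i : Int) ≠ t := fun h' => he h'.symm
            have : t.toNat ≠ i := by omega
            simp [hm, hne, this]
      · rw [if_neg h]
        rw [ih acc hi]
        have he : t ≠ (i : Int) := by omega
        simp [he.symm]

theorem make_neighbor_eq (ct : List Int) (n : Int) :
    make_neighbor ct n = make_neighbor_alt ct n := by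
  unfold make_neighbor make_neighbor_alt
  have heq : (fun (acc : List Int) i => if i ∈ ct then acc ++ [1] else acc ++ [0])
           = fun acc i => acc ++ [if i ∈ ct then (1 : Int) else 0] := by
    funext acc i; split_ifs <;> rfl
  rw [heq, PySem.List.foldl_append_singleton_eq_map, List.nil_append]
  apply List.ext_getElem
  · rw [scatter_length]
    simp [PySem.List.length_pyRange_one]
  · intro i h1 h2
    have hlen : i < n.toNat := by
      simpa [PySem.List.length_pyRange_one] using h1
    have hi' : i < (List.replicate n.toNat (0:Int)).length := by simpa using hlen
    have hin : (i : Int) < n := by omega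
    rw [← List.getD_eq_getElem _ 0 h2,
        scatter_get ct n _ i hi' hin,
        List.getElem_map, PySem.List.getElem_pyRange_one]
    simp

-- ===== VERDICT (by name: the statement is the Claim_ definition above) =====
theorem make_neighbor_spec : Claim_equal_make_neighbor := by
  intro ct n _
  exact make_neighbor_eq ct n
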